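-- pv_equiv track=rewrite | github.com/rhm6501/AdversarialPSOImages | Utilities.py | findPowersOf2
-- ===== SOURCE A (Python) =====
-- def findPowersOf2(start,end):
--     pows = []
--     i=1
--     while 2**i <= end:
--         if 2**i >= start:
--             pows.append(2**i)
--         i=i+1
--     return pows
-- ===== SOURCE B (Python) =====
-- def findPowersOf2(start, end):
--     if end < 2:
--         return []
--     hi = end.bit_length() - 1
--     lo = max(1, (start - 1).bit_length()) if start >= 1 else 1
--     return [2 ** i for i in range(lo, hi + 1)]
-- ===== Notes on version B (the rewrite author's own statement) =====
-- stated objective: simpler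
-- what changed: Replaces the test-each-exponent while loop with closed-form exponent bounds from bit_length and a single list comprehension generating the range of powers.
import Mathlib
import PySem

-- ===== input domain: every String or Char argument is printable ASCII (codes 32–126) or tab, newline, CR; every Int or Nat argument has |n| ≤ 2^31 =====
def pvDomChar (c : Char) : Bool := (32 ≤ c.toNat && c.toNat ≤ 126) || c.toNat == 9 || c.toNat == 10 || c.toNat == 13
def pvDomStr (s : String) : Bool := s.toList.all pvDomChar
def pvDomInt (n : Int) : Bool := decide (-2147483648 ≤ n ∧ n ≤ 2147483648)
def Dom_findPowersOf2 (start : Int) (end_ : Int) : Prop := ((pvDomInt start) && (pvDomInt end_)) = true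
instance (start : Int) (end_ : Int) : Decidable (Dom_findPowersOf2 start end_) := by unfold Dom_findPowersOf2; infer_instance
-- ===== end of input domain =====

-- ===== PORT A =====
-- port of A: the while loop as recursion on the exponent i; terminates because 2^i grows past end_
def loopA (start : Int) (end_ : Int) (i : Nat) : List Int :=
  if _h : 2 ^ i ≤ end_ then
    (if start ≤ 2 ^ i then [(2 : Int) ^ i] else []) ++ loopA start end_ (i + 1)
  else []
termination_by (end_ + 1 - 2 ^ i).toNat
decreasing_by
  have h1 : (0:Int) < 2 ^ i := pow_pos (by norm_num) i
  have _h2 : (2:Int) ^ (i + 1) = 2 * 2 ^ i := by ring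
  omega


def findPowersOf2 (start : Int) (end_ : Int) : List Int := loopA start end_ 1

-- ===== PORT B =====
-- port of B: Python's n.bit_length() for n ≥ 0
def bitLength (n : Int) : Nat := if n ≤ 0 then 0 else Nat.log2 n.toNat + 1

def findPowersOf2_alt (start : Int) (end_ : Int) : List Int :=
  if end_ < 2 then []
  else
    let hi := bitLength end_ - 1
    let lo := if 1 ≤ start then max 1 (bitLength (start - 1)) else 1
    (List.range' lo (hi + 1 - lo)).map (fun i => (2 : Int) ^ i)

-- ===== PRECONDITION & SPEC =====
def Spec_findPowersOf2 (start : Int) (end_ : Int) (out : List Int) : Prop := out = findPowersOf2_alt start end_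
instance (start : Int) (end_ : Int) (out : List Int) : Decidable (Spec_findPowersOf2 start end_ out) := by unfold Spec_findPowersOf2; infer_instance

-- ===== CLAIM (what is proved, stated in full; the proofs are below) =====
def Claim_equal_findPowersOf2 : Prop := ∀ (start : Int) (end_ : Int), Dom_findPowersOf2 start end_ → Spec_findPowersOf2 start end_ (findPowersOf2 start end_)

-- ===== LEMMAS AND PROOFS =====

-- 2^j ≤ end_ exactly when j is below end_'s bit length
theorem pow_le_iff_lt_bitLength (end_ : Int) (j : Nat) :
    (2 : Int) ^ j ≤ end_ ↔ j < bitLength end_ := by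
  have hp : (0:Int) < 2 ^ j := pow_pos (by norm_num) j
  unfold bitLength
  split_ifs with h
  · constructor
    · intro hle; omega
    · intro hj; omega
  · have he : ((end_.toNat : Int)) = end_ := Int.toNat_of_nonneg (by omega)
    have he0 : end_.toNat ≠ 0 := by omega
    have hcast : (2 : Int) ^ j ≤ end_ ↔ 2 ^ j ≤ end_.toNat := by
      rw [← he]; exact_mod_cast Iff.rfl
    rw [hcast, Nat.log2_eq_log_two, (Nat.le_log_iff_pow_le (by norm_num) he0).symm]
    omega

-- characterisation of A's loop
theorem loopA_eq (start end_ : Int) : ∀ (n i : Nat), bitLength end_ - i = n →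
    loopA start end_ i =
      ((List.range' i n).filter (fun j => decide (start ≤ (2:Int) ^ j))).map
        (fun j => (2 : Int) ^ j) := by
  intro n
  induction n with
  | zero =>
    intro i hn
    have : ¬ (2 : Int) ^ i ≤ end_ := by
      rw [pow_le_iff_lt_bitLength]; omega
    rw [loopA]
    simp [this]
  | succ n ih =>
    intro i hn
    have hlt : (2 : Int) ^ i ≤ end_ := by
      rw [pow_le_iff_lt_bitLength]; omega
    rw [loopA]
    rw [List.range'_succ, List.filter_cons]
    have hrec := ih (i + 1) (by omega)
    by_cases hs : start ≤ (2:Int) ^ i <;> simp [hlt, hs, hrec]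

-- filtering a range' by a lower-bound threshold yields a range'
theorem filter_ge_range' (lo : Nat) : ∀ (n i : Nat),
    (List.range' i n).filter (fun j => decide (lo ≤ j)) =
      List.range' (max i lo) (i + n - max i lo) := by
  intro n
  induction n with
  | zero => intro i; simp
  | succ n ih =>
    intro i
    rw [List.range'_succ, List.filter_cons]
    by_cases h : lo ≤ i
    · have h1 : max i lo = i := by omega
      have h2 : max (i+1) lo = i + 1 := by omega
      simp only [h, decide_true, if_pos, ih (i+1), h1, h2]
      rw [show i + 1 + n - (i + 1) = n by omega, show i + (n+1) - i = n + 1 by omega,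
        List.range'_succ]
    · have h2 : max (i+1) lo = lo := by omega
      have h1 : max i lo = lo := by omega
      simp only [h, decide_false, Bool.false_eq_true, ih (i+1), h1, h2,
        show i + 1 + n - lo = i + (n+1) - lo by omega]
      simp

-- ===== VERDICT (by name: the statement is the Claim_ definition above) =====
theorem findPowersOf2_spec : Claim_equal_findPowersOf2 := by
  intro start end_ _hdom
  unfold Spec_findPowersOf2 findPowersOf2 findPowersOf2_alt
  rw [loopA_eq start end_ (bitLength end_ - 1) 1 rfl]
  by_cases hend : end_ < 2
  · have hN : bitLength end_ ≤ 1 := by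
      unfold bitLength; split_ifs with h
      · omega
      · rw [show end_.toNat = 1 by omega]; decide
    rw [show bitLength end_ - 1 = 0 by omega]
    simp [hend]
  · -- end_ ≥ 2, so bitLength end_ ≥ 2
    have hN : 2 ≤ bitLength end_ := by
      have h1 : (2:Int) ^ 1 ≤ end_ := by norm_num; omega
      rw [pow_le_iff_lt_bitLength] at h1; omega
    set lo : Nat := if 1 ≤ start then max 1 (bitLength (start - 1)) else 1 with hlo
    have hlo1 : 1 ≤ lo := by
      rw [hlo]; split_ifs <;> omega
    have hfilt : ∀ j ∈ List.range' 1 (bitLength end_ - 1),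
        decide (start ≤ (2:Int) ^ j) = decide (lo ≤ j) := by
      intro j hj
      have hj1 : 1 ≤ j := (List.mem_range'_1.mp hj).1
      have hp : (0:Int) < 2 ^ j := pow_pos (by norm_num) j
      by_cases hst2 : 2 ≤ start
      · have hb : bitLength (start - 1) ≤ j ↔ start - 1 < (2:Int) ^ j := by
          unfold bitLength
          have h0 : ¬ start - 1 ≤ 0 := by omega
          rw [if_neg h0]
          have he : (((start - 1).toNat : Int)) = start - 1 := Int.toNat_of_nonneg (by omega)
          have he0 : (start - 1).toNat ≠ 0 := by omega
          have hcast : start - 1 < (2:Int) ^ j ↔ (start - 1).toNat < 2 ^ j := by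
            rw [← he]; exact_mod_cast Iff.rfl
          rw [hcast, Nat.log2_eq_log_two, (Nat.log_lt_iff_lt_pow (by norm_num) he0).symm]
          omega
        have hmax : lo = bitLength (start - 1) := by
          rw [hlo, if_pos (by omega : 1 ≤ start)]
          have h1 : 1 ≤ bitLength (start - 1) := by
            unfold bitLength; split_ifs with h <;> omega
          omega
        rw [hmax]
        by_cases hle : start ≤ (2:Int) ^ j
        · simp [hle, hb.mpr (by omega : start - 1 < (2:Int) ^ j)]
        · have hnb : ¬ bitLength (start - 1) ≤ j := fun hc => hle (by have := hb.mp hc; omega)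
          simp [hle, hnb]
      · -- start ≤ 1: lo = 1 and the condition always holds for j ≥ 1
        have hloval : lo = 1 := by
          rw [hlo]; split_ifs with h
          · rw [show start - 1 = 0 by omega]; decide
          · rfl
        have hle : start ≤ (2:Int) ^ j := by omega
        simp [hle, hloval, hj1]
    rw [List.filter_congr hfilt, filter_ge_range' lo (bitLength end_ - 1) 1,
      show max 1 lo = lo by omega, if_neg hend]
    show _ = List.map (fun i => (2:Int) ^ i) (List.range' lo (bitLength end_ - 1 + 1 - lo))
    rw [show bitLength end_ - 1 + 1 - lo = 1 + (bitLength end_ - 1) - lo by omega]
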